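-- pv_equiv track=rewrite | github.com/Yoonkyo/algorithm_code | leetcode/leetcode_211226_week_A.py | isSameAfterReversals
-- ===== SOURCE A (Python) =====
-- def isSameAfterReversals(num):
--     if num == 0:
--         return True
--     result = ""
--     reverse_num = str(num)[::-1]
--     for i in reverse_num:
--         result += i
--         if result == "0":
--             return False
--     return True
--
--     """
--     :type num: int
--     :rtype: bool
--     """
-- ===== SOURCE B (Python) =====
-- def isSameAfterReversals(num):
--     # Direct arithmetic: reversing twice only loses trailing zeros,
--     # so the number is unchanged iff it is 0 or not divisible by 10.
--     return num == 0 or num % 10 != 0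
-- ===== Notes on version B (the rewrite author's own statement) =====
-- stated objective: simpler
-- what changed: Replaced the string-reversal plus character-accumulation loop with a single arithmetic check of the trailing digit (num == 0 or num % 10 != 0); no string is built and no loop runs.
import Mathlib
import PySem

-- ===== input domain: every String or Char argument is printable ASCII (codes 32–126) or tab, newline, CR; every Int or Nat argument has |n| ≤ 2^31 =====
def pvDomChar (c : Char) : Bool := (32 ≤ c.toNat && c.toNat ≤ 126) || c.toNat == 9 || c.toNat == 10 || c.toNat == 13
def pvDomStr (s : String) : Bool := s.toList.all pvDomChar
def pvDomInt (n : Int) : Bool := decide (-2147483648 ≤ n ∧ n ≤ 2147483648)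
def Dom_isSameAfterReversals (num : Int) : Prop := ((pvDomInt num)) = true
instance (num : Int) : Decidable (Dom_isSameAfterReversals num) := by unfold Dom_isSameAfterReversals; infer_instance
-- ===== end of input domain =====

-- B replaces A's string-reversal-and-scan with a single arithmetic trailing-digit test (simpler).


-- ===== PORT A =====
-- the for-loop over reverse_num with the accumulating string `result` (strings as List Char)
def pvLoopA : List Char → List Char → Bool
  | [], _ => true
  | c :: rest, result =>
    let result' := result ++ [c]          -- result += i
    if result' = ['0'] then false         -- if result == "0": return False
    else pvLoopA rest result'

def isSameAfterReversals (num : Int) : Bool :=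
  if num == 0 then true
  else
    -- str(num)[::-1], as a char list (exact: the [::-1] slice of a string is its reversal)
    let reverse_num := (PySem.Int.toChars num).reverse
    pvLoopA reverse_num []                -- result = ""

-- ===== PORT B =====
def isSameAfterReversals_alt (num : Int) : Bool :=
  num == 0 || !(PySem.Int.mod num 10 == 0)

-- ===== PRECONDITION & SPEC =====
def Spec_isSameAfterReversals (num : Int) (out : Bool) : Prop := out = isSameAfterReversals_alt num
instance (num : Int) (out : Bool) : Decidable (Spec_isSameAfterReversals num out) := by unfold Spec_isSameAfterReversals; infer_instance

-- ===== CLAIM (what is proved, stated in full; the proofs are below) =====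
def Claim_equal_isSameAfterReversals : Prop := ∀ (num : Int), Dom_isSameAfterReversals num → Spec_isSameAfterReversals num (isSameAfterReversals num)

-- ===== LEMMAS AND PROOFS =====

-- once `result` is nonempty, it can never again equal "0": the loop returns True
theorem pvLoopA_of_ne_nil (l : List Char) : ∀ res : List Char, res ≠ [] → pvLoopA l res = true := by
  induction l with
  | nil => intro res _; rfl
  | cons c rest ih =>
      intro res hres
      unfold pvLoopA
      have h1 : res ++ [c] ≠ ['0'] := by
        intro h
        have := congrArg List.length h
        simp at this
        exact hres this
      simp only [h1]
      exact ih _ (by simp)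

-- the loop from the empty accumulator only looks at the first character
theorem pvLoopA_cons (c : Char) (rest : List Char) :
    pvLoopA (c :: rest) [] = !(c == '0') := by
  unfold pvLoopA
  by_cases h : c = '0'
  · subst h; simp
  · have h1 : [c] ≠ ['0'] := by simp [h]
    simp only [List.nil_append, h1]
    rw [pvLoopA_of_ne_nil rest [c] (by simp)]
    simp [h]

-- last digit character of Nat.toDigitsCore
theorem toDigitsCore_getLast? (f : Nat) : ∀ (n : Nat) (ds : List Char), n < f →
    (Nat.toDigitsCore 10 f n ds).getLast? = (Nat.digitChar (n % 10) :: ds).getLast? := by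
  induction f with
  | zero => intro n ds h; omega
  | succ f ih =>
      intro n ds h
      unfold Nat.toDigitsCore
      by_cases h10 : n / 10 = 0
      · simp [h10]
      · simp only [h10, if_neg, not_false_iff]
        rw [ih (n / 10) _ (by omega)]
        simp

theorem toDigits_getLast? (n : Nat) :
    (Nat.toDigits 10 n).getLast? = some (Nat.digitChar (n % 10)) := by
  unfold Nat.toDigits
  rw [toDigitsCore_getLast? (n + 1) n [] (by omega)]
  simp

-- the first character scanned by A's loop is the digit character of |num| mod 10
theorem toChars_reverse_head (num : Int) :
    (PySem.Int.toChars num).reverse.head? = some (Nat.digitChar (num.natAbs % 10)) := by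
  unfold PySem.Int.toChars
  by_cases h : num < 0
  · simp only [h, if_pos]
    rw [List.head?_reverse]
    have hlast := toDigits_getLast? num.natAbs
    cases hd : Nat.toDigits 10 num.natAbs with
    | nil => rw [hd] at hlast; simp at hlast
    | cons x xs => rw [hd] at hlast; rw [List.getLast?_cons_cons, hlast]
  · simp only [h, if_neg, not_false_iff]
    rw [List.head?_reverse, toDigits_getLast?]
    have : num.toNat = num.natAbs := by omega
    rw [this]

theorem digitChar_eq_zero_iff (k : Nat) (hk : k < 10) :
    (Nat.digitChar k = '0') ↔ k = 0 := by
  interval_cases k <;> simp [Nat.digitChar]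

-- ===== VERDICT (by name: the statement is the Claim_ definition above) =====
theorem isSameAfterReversals_spec : Claim_equal_isSameAfterReversals := by
  intro num _
  unfold Spec_isSameAfterReversals isSameAfterReversals isSameAfterReversals_alt
  by_cases h0 : num = 0
  · simp [h0]
  · have hne : (num == 0) = false := by simp [h0]
    simp only [hne, Bool.false_or, if_neg, Bool.false_eq_true, not_false_iff]
    -- the reversed digit list is nonempty with known head
    have hhead := toChars_reverse_head num
    obtain ⟨rest, hrest⟩ : ∃ rest, (PySem.Int.toChars num).reverse
        = Nat.digitChar (num.natAbs % 10) :: rest := by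
      cases hl : (PySem.Int.toChars num).reverse with
      | nil => rw [hl] at hhead; simp at hhead
      | cons c rest =>
          rw [hl] at hhead; simp at hhead
          exact ⟨rest, by rw [hhead]⟩
    rw [hrest, pvLoopA_cons]
    have hmod : PySem.Int.mod num 10 = num % 10 := by
      unfold PySem.Int.mod
      rw [Int.fmod_eq_emod]; norm_num
    rw [hmod]
    have hiff : (Nat.digitChar (num.natAbs % 10) = '0') ↔ num % 10 = 0 := by
      rw [digitChar_eq_zero_iff _ (Nat.mod_lt _ (by norm_num))]
      omega
    by_cases hz : num % 10 = 0
    · simp [hz, hiff.mpr hz]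
    · have : ¬ (Nat.digitChar (num.natAbs % 10) = '0') := fun h => hz (hiff.mp h)
      simp [hz, this]
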